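-- pv_equiv track=rewrite | github.com/36041255/BondFlow | BondFlow/experiment/analysis/eval_bonds.py | _compute_chain_terminals
-- ===== SOURCE A (Python) =====
-- from typing import Dict, List, Set, Tuple, Optional
--
-- def _compute_chain_terminals(pdb_idx: List[Tuple[str, str]]) -> Set[int]:
--     """Return indices that are chain termini (first and last residue of each chain)."""
--     first_seen: Dict[str, int] = {}
--     last_seen: Dict[str, int] = {}
--     for k, (chain_id, _res) in enumerate(pdb_idx):
--         if chain_id not in first_seen:
--             first_seen[chain_id] = k
--         last_seen[chain_id] = k
--     terminals: Set[int] = set()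
--     for cid in first_seen:
--         terminals.add(first_seen[cid])
--         terminals.add(last_seen[cid])
--     return terminals
-- ===== SOURCE B (Python) =====
-- from typing import List, Set, Tuple
--
--
-- def _compute_chain_terminals(pdb_idx: List[Tuple[str, str]]) -> Set[int]:
--     """Recursively peel off one chain at a time: the head pair gives the chain's
--     first index, the last matching pair its last index; recurse on the rest."""
--     def peel(pairs):
--         if not pairs:
--             return []
--         k0, c0 = pairs[0]
--         ks = [k for k, c in pairs if c == c0]
--         last = ks[-1]
--         out = [k0] if last == k0 else [k0, last]
--         return out + peel([(k, c) for k, c in pairs if c != c0])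
--     return set(peel([(k, c) for k, (c, _r) in enumerate(pdb_idx)]))
-- ===== Notes on version B (the rewrite author's own statement) =====
-- stated objective: alternative
-- what changed: Replaces A's dict-building forward pass plus dict-key emission loop by a recursive chain-peeling algorithm: take the head pair's chain, read off its first index (the head) and last index (last matching pair), drop all pairs of that chain and recurse; no dictionaries or seen-sets are maintained.
import Mathlib
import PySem

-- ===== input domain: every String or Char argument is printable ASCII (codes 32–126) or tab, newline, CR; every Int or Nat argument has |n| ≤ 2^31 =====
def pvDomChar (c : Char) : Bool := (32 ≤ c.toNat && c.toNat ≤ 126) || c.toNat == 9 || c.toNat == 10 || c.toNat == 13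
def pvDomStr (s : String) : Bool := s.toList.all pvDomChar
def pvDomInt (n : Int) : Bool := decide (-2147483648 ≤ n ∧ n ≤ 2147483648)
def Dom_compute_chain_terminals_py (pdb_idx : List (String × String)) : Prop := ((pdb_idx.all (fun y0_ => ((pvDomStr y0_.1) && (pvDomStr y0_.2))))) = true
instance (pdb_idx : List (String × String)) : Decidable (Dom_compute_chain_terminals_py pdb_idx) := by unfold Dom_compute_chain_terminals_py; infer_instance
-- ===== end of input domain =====

-- B replaces A's dict-building pass + key-emission loop by a recursive chain-peeling
-- algorithm (no dicts, no seen-sets): alternative decomposition, similar cost.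
-- Python result type is set[int]; the ports return its element list in insertion order.

-- ===== PORT A =====
def compute_chain_terminals_py (pdb_idx : List (String × String)) : List Int :=
  let fl := (PySem.List.enumerate pdb_idx).foldl
    (fun (st : PySem.Dict String Int × PySem.Dict String Int) kp =>
      (if st.1.contains kp.2.1 then st.1 else st.1.insert kp.2.1 kp.1,
       st.2.insert kp.2.1 kp.1))
    (PySem.Dict.empty, PySem.Dict.empty)
  -- first_seen[cid] / last_seen[cid]: cid always a key of both dicts, so getD is exact here
  fl.1.keys.foldl
    (fun t cid => PySem.Set.add (PySem.Set.add t (fl.1.getD cid 0)) (fl.2.getD cid 0))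
    PySem.Set.empty

-- ===== PORT B =====
-- peel: ks is nonempty by construction, so getLastD's default is never used (exact for ks[-1])
def pvPeel : List (Int × String) → List Int
  | [] => []
  | q :: rest =>
    let ks : List Int := q.1 :: ((rest.filter (fun x => x.2 == q.2)).map (·.1))
    let last : Int := ks.getLastD 0
    (if last == q.1 then [q.1] else [q.1, last]) ++ pvPeel (rest.filter (fun x => x.2 != q.2))
termination_by l => l.length
decreasing_by simp; exact le_trans (List.length_filter_le _ _) (by simp)

def compute_chain_terminals_py_alt (pdb_idx : List (String × String)) : List Int :=
  PySem.Set.ofList (pvPeel ((PySem.List.enumerate pdb_idx).map (fun kp => (kp.1, kp.2.1))))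

-- ===== PRECONDITION & SPEC =====
def Spec_compute_chain_terminals_py (pdb_idx : List (String × String)) (out : List Int) : Prop := out = compute_chain_terminals_py_alt pdb_idx
instance (pdb_idx : List (String × String)) (out : List Int) : Decidable (Spec_compute_chain_terminals_py pdb_idx out) := by unfold Spec_compute_chain_terminals_py; infer_instance

-- ===== CLAIM (what is proved, stated in full; the proofs are below) =====
def Claim_equal_compute_chain_terminals_py : Prop := ∀ (pdb_idx : List (String × String)), Dom_compute_chain_terminals_py pdb_idx → Spec_compute_chain_terminals_py pdb_idx (compute_chain_terminals_py pdb_idx)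

-- ===== LEMMAS AND PROOFS =====

-- last occurrence index of chain c in l (the value A's last_seen dict holds), 0 if absent
def pvLastB (l : List (Int × String)) (c : String) : Int :=
  ((l.reverse.find? (fun x => x.2 == c)).map (·.1)).getD 0

-- the (chain, index) pairs at first occurrences of chains not in `seen`, in order
def pvFirsts (seen : List String) : List (Int × String) → List (String × Int)
  | [] => []
  | q :: rest =>
    if q.2 ∈ seen then pvFirsts seen rest
    else (q.2, q.1) :: pvFirsts (q.2 :: seen) rest

theorem pvFirsts_congr (l : List (Int × String)) :
    ∀ (s s' : List String), (∀ c, c ∈ s ↔ c ∈ s') → pvFirsts s l = pvFirsts s' l := by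
  induction l with
  | nil => intro s s' _; rfl
  | cons q rest ih =>
    intro s s' h
    simp only [pvFirsts]
    by_cases hm : q.2 ∈ s
    · rw [if_pos hm, if_pos ((h _).1 hm), ih s s' h]
    · rw [if_neg hm, if_neg (fun hx => hm ((h _).2 hx))]
      congr 1
      exact ih _ _ (fun c => by simp [h c])

theorem pvFirsts_not_mem (l : List (Int × String)) :
    ∀ (s : List String) (p : String × Int), p ∈ pvFirsts s l → p.1 ∉ s := by
  induction l with
  | nil => intro s p hp; simp [pvFirsts] at hp
  | cons q rest ih =>
    intro s p hp
    simp only [pvFirsts] at hp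
    by_cases hm : q.2 ∈ s
    · rw [if_pos hm] at hp; exact ih s p hp
    · rw [if_neg hm] at hp
      rcases List.mem_cons.mp hp with h | h
      · subst h; exact hm
      · intro hs; exact ih _ p h (List.mem_cons_of_mem _ hs)

theorem pvFirsts_nodup (l : List (Int × String)) :
    ∀ (s : List String), ((pvFirsts s l).map (·.1)).Nodup := by
  induction l with
  | nil => intro s; simp [pvFirsts]
  | cons q rest ih =>
    intro s
    simp only [pvFirsts]
    by_cases hm : q.2 ∈ s
    · rw [if_pos hm]; exact ih s
    · rw [if_neg hm]
      simp only [List.map_cons, List.nodup_cons]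
      refine ⟨?_, ih _⟩
      intro hmem
      rcases List.mem_map.mp hmem with ⟨p, hp, hp1⟩
      exact pvFirsts_not_mem rest _ p hp (by simp [hp1])

-- keys recorded by pvFirsts are keys of elements of l
theorem pvFirsts_key_mem (l : List (Int × String)) :
    ∀ (s : List String) (p : String × Int), p ∈ pvFirsts s l → p.1 ∈ l.map (·.2) := by
  induction l with
  | nil => intro s p hp; simp [pvFirsts] at hp
  | cons q rest ih =>
    intro s p hp
    simp only [pvFirsts] at hp
    by_cases hm : q.2 ∈ s
    · rw [if_pos hm] at hp; exact List.mem_cons_of_mem _ (ih s p hp)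
    · rw [if_neg hm] at hp
      rcases List.mem_cons.mp hp with h | h
      · subst h; simp
      · exact List.mem_cons_of_mem _ (ih _ p h)

-- skipping a seen chain = filtering its pairs out first
theorem pvFirsts_filter (l : List (Int × String)) :
    ∀ (seen : List String) (c : String),
      pvFirsts (c :: seen) l = pvFirsts seen (l.filter (fun x => x.2 != c)) := by
  induction l with
  | nil => intro seen c; rfl
  | cons q rest ih =>
    intro seen c
    by_cases hc : q.2 = c
    · have : (q.2 != c) = false := by simp [hc]
      simp only [pvFirsts, List.filter_cons, this, if_pos (by simp [hc] : q.2 ∈ c :: seen)]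
      exact ih seen c
    · have hbc : (q.2 != c) = true := by simp [hc]
      simp only [List.filter_cons, hbc, if_true]
      by_cases hm : q.2 ∈ seen
      · simp only [pvFirsts, if_pos (List.mem_cons_of_mem _ hm), if_pos hm]
        exact ih seen c
      · have hm' : q.2 ∉ c :: seen := by
          intro h; rcases List.mem_cons.mp h with h | h; exact hc h; exact hm h
        simp only [pvFirsts, if_neg hm', if_neg hm]
        congr 1
        rw [pvFirsts_congr rest (q.2 :: c :: seen) (c :: q.2 :: seen)
          (fun x => by simp; tauto)]
        exact ih (q.2 :: seen) c

-- unconditional-insert fold: get? keeps the LAST binding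
theorem pvInsFold_get? (l : List (Int × String)) :
    ∀ (d : PySem.Dict String Int) (c : String),
      (l.foldl (fun d q => d.insert q.2 q.1) d).get? c
        = ((l.reverse.find? (fun q => q.2 == c)).map (·.1)).or (d.get? c) := by
  induction l with
  | nil => intro d c; simp
  | cons q rest ih =>
    intro d c
    simp only [List.foldl_cons, List.reverse_cons, List.find?_append, ih]
    by_cases he : q.2 = c
    · subst he
      rw [PySem.Dict.get?_insert_self]
      simp only [List.find?_cons, beq_self_eq_true]
      cases rest.reverse.find? (fun x => x.2 == q.2) <;> simp
    · have hb : (q.2 == c) = false := by simp [he]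
      rw [PySem.Dict.get?_insert_of_ne _ _ (Ne.symm he)]
      simp only [List.find?_cons, List.find?_nil, hb]
      cases rest.reverse.find? (fun x => x.2 == c) <;> simp

-- the first-seen dict accumulates exactly pvFirsts as items
theorem pvCondFold_items (l : List (Int × String)) :
    ∀ (d : PySem.Dict String Int),
      (l.foldl (fun d q => if d.contains q.2 then d else d.insert q.2 q.1) d).items
        = d.items ++ pvFirsts d.keys l := by
  induction l with
  | nil => intro d; simp [pvFirsts]
  | cons q rest ih =>
    intro d
    simp only [List.foldl_cons, pvFirsts]
    by_cases hc : d.contains q.2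
    · rw [if_pos hc, ih, if_pos ((PySem.Dict.contains_iff_mem_keys _ _).mp hc)]
    · have hcf : d.contains q.2 = false := by revert hc; cases d.contains q.2 <;> simp
      have hm : q.2 ∉ d.keys := fun h => hc ((PySem.Dict.contains_iff_mem_keys _ _).mpr h)
      rw [if_neg hc, ih, if_neg hm,
        PySem.Dict.items_insert_of_not_contains _ _ hcf,
        PySem.Dict.keys_insert_of_not_contains _ _ hcf,
        pvFirsts_congr rest _ (q.2 :: d.keys) (fun c => by simp [or_comm])]
      simp

-- the pair fold of A splits into its two dict folds
theorem pvFoldPairA (l : List (Int × String)) :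
    ∀ (a b : PySem.Dict String Int),
      l.foldl (fun st q =>
          (if st.1.contains q.2 then st.1 else st.1.insert q.2 q.1,
           st.2.insert q.2 q.1)) (a, b)
        = (l.foldl (fun d q => if d.contains q.2 then d else d.insert q.2 q.1) a,
           l.foldl (fun d q => d.insert q.2 q.1) b) := by
  induction l with
  | nil => intro a b; rfl
  | cons q rest ih => intro a b; simpa using ih _ _

-- a double-add fold is a Set.add fold over the flattened emissions
theorem pvFold2 (f g : (String × Int) → Int) (ps : List (String × Int)) :
    ∀ (t : List Int),
      ps.foldl (fun t p => PySem.Set.add (PySem.Set.add t (f p)) (g p)) t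
        = (ps.flatMap (fun p => [f p, g p])).foldl PySem.Set.add t := by
  induction ps with
  | nil => intro t; rfl
  | cons p rest ih => intro t; simp only [List.foldl_cons, List.flatMap_cons,
      List.foldl_append, List.foldl_cons, List.foldl_nil, ih]

-- reverse-find = last element of the filtered list
theorem pvFindRev (pred : (Int × String) → Bool) (m : List (Int × String)) :
    m.reverse.find? pred = (m.filter pred).getLast? := by
  induction m with
  | nil => rfl
  | cons x t ih =>
    rw [List.reverse_cons, List.find?_append, ih, List.filter_cons]
    by_cases hp : pred x
    · simp only [hp, if_true, List.find?_cons]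
      cases h : (t.filter pred).getLast? with
      | none => simp [List.getLast?_eq_none_iff.mp h]
      | some a =>
        have : t.filter pred ≠ [] := by
          intro he; rw [he] at h; simp at h
        simp [List.getLast?_cons, h]
    · simp [hp]

-- the last index pvPeel picks for the head chain is an index of the input
theorem pvHeadLast_mem (q : Int × String) (rest : List (Int × String)) :
    (q.1 :: ((rest.filter (fun x => x.2 == q.2)).map (·.1))).getLastD 0 ∈ (q :: rest).map (·.1) := by
  rw [List.getLastD_cons]
  cases h : ((rest.filter (fun x => x.2 == q.2)).map (·.1)).getLast? with
  | none => simp [List.getLastD_eq_getLast?, h]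
  | some a =>
    rw [List.getLastD_eq_getLast?, h]
    rcases List.mem_map.mp (List.mem_of_getLast? h) with ⟨e, he, hea⟩
    simp only [Option.getD_some, List.map_cons]
    exact List.mem_cons_of_mem _ (List.mem_map.mpr ⟨e, List.mem_of_mem_filter he, hea⟩)

-- elements produced by pvPeel are first components of the input
theorem pvPeel_subset_aux : ∀ (n : Nat) (l : List (Int × String)), l.length ≤ n →
    ∀ x, x ∈ pvPeel l → x ∈ l.map (·.1) := by
  intro n
  induction n with
  | zero =>
    intro l hl x hx
    rw [List.length_eq_zero_iff.mp (Nat.le_zero.mp hl)] at hx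
    simp [pvPeel] at hx
  | succ n ih =>
    intro l hl x hx
    cases l with
    | nil => simp [pvPeel] at hx
    | cons q rest =>
      rw [pvPeel] at hx
      rcases List.mem_append.mp hx with h | h
      · have hx2 : x = q.1 ∨ x = (q.1 :: ((rest.filter (fun x => x.2 == q.2)).map (·.1))).getLastD 0 := by
          by_cases hc : (((q.1 :: ((rest.filter (fun x => x.2 == q.2)).map (·.1))).getLastD 0) == q.1) = true
          · rw [if_pos hc] at h; left; simpa using h
          · rw [if_neg hc] at h; simpa using h
        rcases hx2 with h' | h'
        · simp [h']
        · rw [h']; exact pvHeadLast_mem q rest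
      · have hlen : (rest.filter (fun x => x.2 != q.2)).length ≤ n :=
          le_trans (List.length_filter_le _ _) (by simpa using Nat.le_of_succ_le_succ hl)
        have := ih _ hlen x h
        rcases List.mem_map.mp this with ⟨e, he, hea⟩
        exact List.mem_cons_of_mem _ (List.mem_map.mpr ⟨e, List.mem_of_mem_filter he, hea⟩)

theorem pvPeel_subset (l : List (Int × String)) :
    ∀ x, x ∈ pvPeel l → x ∈ l.map (·.1) := pvPeel_subset_aux l.length l le_rfl

-- filtering away other keys does not change a key-c find
theorem pvFind_filter (m : List (Int × String)) (g : (Int × String) → Bool)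
    (c : String) (h : ∀ x, (x.2 == c) = true → g x = true) :
    (m.filter g).find? (fun x => x.2 == c) = m.find? (fun x => x.2 == c) := by
  induction m with
  | nil => rfl
  | cons x t ih =>
    rw [List.filter_cons]
    by_cases hx : (x.2 == c)
    · rw [if_pos (h x hx)]; simp [hx]
    · by_cases hg : g x
      · simp [hg, hx, ih]
      · simp only [hg, if_neg, Bool.false_eq_true, not_false_iff, ih]
        simp [hx]

-- pvLastB is unchanged by dropping pairs of a different chain
theorem pvLastB_filter (l : List (Int × String)) (c d : String) (hcd : c ≠ d) :
    pvLastB (l.filter (fun x => x.2 != d)) c = pvLastB l c := by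
  unfold pvLastB
  rw [← List.filter_reverse, pvFind_filter]
  intro x hx
  have : x.2 = c := by simpa using hx
  simp [this, hcd]

-- a two-element set literal, deduplicated
theorem pvOfListPair (a b : Int) :
    PySem.Set.ofList [a, b] = (if (b == a) then [a] else [a, b]) := by
  by_cases h : b = a
  · simp [h, PySem.Set.ofList, PySem.Set.add, PySem.Set.contains]
  · have hb : (b == a) = false := by simp [h]
    simp [hb, PySem.Set.ofList, PySem.Set.add, PySem.Set.contains, h]

-- MAIN: the emission fold over first/last values equals the peeled list
theorem pvMainAux : ∀ (n : Nat) (l : List (Int × String)), l.length ≤ n → (l.map (·.1)).Nodup →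
    PySem.Set.ofList ((pvFirsts [] l).flatMap (fun p => [p.2, pvLastB l p.1])) = pvPeel l := by
  intro n
  induction n with
  | zero =>
    intro l hl _
    rw [List.length_eq_zero_iff.mp (Nat.le_zero.mp hl)]
    simp [pvPeel, pvFirsts]
  | succ n ih =>
    intro l hl hnd
    cases l with
    | nil => simp [pvPeel, pvFirsts]
    | cons q rest =>
      have hndr : (rest.map (·.1)).Nodup := (List.nodup_cons.mp (by simpa using hnd)).2
      have hq1 : q.1 ∉ rest.map (·.1) := (List.nodup_cons.mp (by simpa using hnd)).1
      have hnd' : ((rest.filter (fun x => x.2 != q.2)).map (·.1)).Nodup :=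
        (List.Sublist.map _ List.filter_sublist).nodup hndr
      have hlen : (rest.filter (fun x => x.2 != q.2)).length ≤ n :=
        le_trans (List.length_filter_le _ _) (by simpa using Nat.le_of_succ_le_succ hl)
      -- head chain's last index as pvPeel computes it
      have hlast : pvLastB (q :: rest) q.2
          = ((q.1 :: ((rest.filter (fun x => x.2 == q.2)).map (·.1))).getLastD 0) := by
        unfold pvLastB
        rw [pvFindRev]
        have : (q :: rest).filter (fun x => x.2 == q.2) = q :: rest.filter (fun x => x.2 == q.2) := by
          simp
        rw [this, List.getLastD_cons, List.getLast?_cons, List.getLastD_eq_getLast?,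
          List.getLast?_map]
        cases h : (rest.filter (fun x => x.2 == q.2)).getLast? with
        | none => simp
        | some e => simp
      -- unfold both sides one step
      rw [pvPeel]
      have hfirsts : pvFirsts [] (q :: rest)
          = (q.2, q.1) :: pvFirsts [] (rest.filter (fun x => x.2 != q.2)) := by
        simp only [pvFirsts, List.not_mem_nil, if_false]
        simp [pvFirsts_filter]
      rw [hfirsts, List.flatMap_cons]
      -- rewrite the tail emissions to be relative to the filtered list
      have htail : (pvFirsts [] (rest.filter (fun x => x.2 != q.2))).flatMap
            (fun p => [p.2, pvLastB (q :: rest) p.1])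
          = (pvFirsts [] (rest.filter (fun x => x.2 != q.2))).flatMap
            (fun p => [p.2, pvLastB (rest.filter (fun x => x.2 != q.2)) p.1]) := by
        apply List.flatMap_congr
        intro p hp
        have hkey : p.1 ∈ (rest.filter (fun x => x.2 != q.2)).map (·.2) :=
          pvFirsts_key_mem _ _ p hp
        have hne : p.1 ≠ q.2 := by
          rcases List.mem_map.mp hkey with ⟨e, he, hep⟩
          have h2 := List.of_mem_filter he
          rw [← hep]
          simpa using h2
        have h1 : pvLastB (q :: rest) p.1 = pvLastB rest p.1 := by
          unfold pvLastB
          rw [List.reverse_cons, List.find?_append]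
          have : (q.2 == p.1) = false := by simp [Ne.symm hne]
          simp [this]
        have h2 : pvLastB (rest.filter (fun x => x.2 != q.2)) p.1 = pvLastB rest p.1 :=
          pvLastB_filter rest p.1 q.2 hne
        rw [h1, ← h2]
      rw [htail, hlast]
      -- split the ofList at the head emission
      rw [PySem.Set.ofList_append, PySem.Set.update_eq_append_filter,
        ih (rest.filter (fun x => x.2 != q.2)) hlen hnd']
      -- case analysis on the head chain's last index
      have hLD : (q.1 :: ((rest.filter (fun x => x.2 == q.2)).map (·.1))).getLastD 0 = q.1
          ∨ ∃ e, e ∈ rest ∧ (e.2 == q.2) = true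
              ∧ e.1 = (q.1 :: ((rest.filter (fun x => x.2 == q.2)).map (·.1))).getLastD 0 := by
        rw [List.getLastD_cons, List.getLastD_eq_getLast?]
        cases h : ((rest.filter (fun x => x.2 == q.2)).map (·.1)).getLast? with
        | none => left; rfl
        | some a =>
          right
          rcases List.mem_map.mp (List.mem_of_getLast? h) with ⟨e, he, hea⟩
          exact ⟨e, List.mem_of_mem_filter he, List.of_mem_filter (p := fun x : Int × String => x.2 == q.2) he, by simp [hea]⟩
      -- every peeled index of the filtered rest differs from q.1 and from the head's last
      have hdisj : ∀ y ∈ pvPeel (rest.filter (fun x => x.2 != q.2)),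
          y ≠ q.1 ∧ y ≠ (q.1 :: ((rest.filter (fun x => x.2 == q.2)).map (·.1))).getLastD 0 := by
        intro y hy
        have hy1 : y ∈ (rest.filter (fun x => x.2 != q.2)).map (·.1) := pvPeel_subset _ y hy
        rcases List.mem_map.mp hy1 with ⟨e, he, hey⟩
        have herest : e ∈ rest := List.mem_of_mem_filter he
        have heker : (e.2 != q.2) = true := List.of_mem_filter (p := fun x : Int × String => x.2 != q.2) he
        have hyq1 : y ≠ q.1 := by
          intro hq
          exact hq1 (by rw [← hq, ← hey]; exact List.mem_map.mpr ⟨e, herest, rfl⟩)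
        refine ⟨hyq1, ?_⟩
        intro hq
        rcases hLD with h | ⟨e', he'rest, he'k, he'1⟩
        · exact hyq1 (by rw [hq, h])
        · have hfst : e.1 = e'.1 := by rw [hey, hq, he'1]
          have heq : e = e' := List.inj_on_of_nodup_map hndr herest he'rest hfst
          rw [heq, eq_of_beq he'k] at heker
          simp at heker
      -- hence the freshness filter keeps everything
      have hfilter : (pvPeel (rest.filter (fun x => x.2 != q.2))).filter
          (fun y => !(PySem.Set.contains (PySem.Set.ofList
            [q.1, (q.1 :: ((rest.filter (fun x => x.2 == q.2)).map (·.1))).getLastD 0]) y))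
          = pvPeel (rest.filter (fun x => x.2 != q.2)) := by
        apply List.filter_eq_self.mpr
        intro y hy
        rcases hdisj y hy with ⟨h1, h2⟩
        have hnm : y ∉ PySem.Set.ofList
            [q.1, (q.1 :: ((rest.filter (fun x => x.2 == q.2)).map (·.1))).getLastD 0] := by
          intro hmem
          have hmem' := (PySem.Set.mem_ofList _ _).mp hmem
          simp only [List.mem_cons, List.not_mem_nil, or_false] at hmem'
          rcases hmem' with h | h
          · exact h1 h
          · exact h2 h
        have hcf : PySem.Set.contains (PySem.Set.ofList
            [q.1, (q.1 :: ((rest.filter (fun x => x.2 == q.2)).map (·.1))).getLastD 0]) y = false := by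
          cases hc : PySem.Set.contains (PySem.Set.ofList
            [q.1, (q.1 :: ((rest.filter (fun x => x.2 == q.2)).map (·.1))).getLastD 0]) y
          · rfl
          · exact absurd ((PySem.Set.contains_iff _ _).mp hc) hnm
        simp only [hcf, Bool.not_false]
      rw [hfilter]
      -- the head emission dedups to pvPeel's head block
      rw [pvOfListPair]

theorem pvMain (l : List (Int × String)) (hnd : (l.map (·.1)).Nodup) :
    PySem.Set.ofList ((pvFirsts [] l).flatMap (fun p => [p.2, pvLastB l p.1])) = pvPeel l :=
  pvMainAux l.length l le_rfl hnd

-- ===== VERDICT (by name: the statement is the Claim_ definition above) =====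
theorem compute_chain_terminals_py_spec : Claim_equal_compute_chain_terminals_py := by
  intro pdb_idx _
  unfold Spec_compute_chain_terminals_py compute_chain_terminals_py compute_chain_terminals_py_alt
  have h0 : (PySem.List.enumerate pdb_idx).foldl
      (fun (st : PySem.Dict String Int × PySem.Dict String Int) kp =>
        (if st.1.contains kp.2.1 then st.1 else st.1.insert kp.2.1 kp.1, st.2.insert kp.2.1 kp.1))
      (PySem.Dict.empty, PySem.Dict.empty)
    = (((PySem.List.enumerate pdb_idx).map (fun kp => (kp.1, kp.2.1))).foldl
         (fun d q => if d.contains q.2 then d else d.insert q.2 q.1) PySem.Dict.empty,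
       ((PySem.List.enumerate pdb_idx).map (fun kp => (kp.1, kp.2.1))).foldl
         (fun d q => d.insert q.2 q.1) PySem.Dict.empty) :=
    (List.foldl_map).symm.trans
      (pvFoldPairA ((PySem.List.enumerate pdb_idx).map (fun kp => (kp.1, kp.2.1)))
        PySem.Dict.empty PySem.Dict.empty)
  dsimp only
  rw [h0]
  set S := (PySem.List.enumerate pdb_idx).map (fun kp => (kp.1, kp.2.1)) with hS
  set cf := S.foldl (fun d q => if d.contains q.2 then d else d.insert q.2 q.1)
    PySem.Dict.empty with hcf
  have hitems : cf.items = pvFirsts [] S := by rw [hcf, pvCondFold_items]; rfl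
  have hkeys : cf.keys = (pvFirsts [] S).map (·.1) := by
    simp only [PySem.Dict.keys, hitems]
  have hndk : cf.keys.Nodup := by rw [hkeys]; exact pvFirsts_nodup S []
  have hndS : (S.map (·.1)).Nodup := by
    rw [hS, List.map_map]
    have hp := PySem.List.pairwise_lt_enumerate pdb_idx 0
    exact List.pairwise_map.mpr (hp.imp (fun h => ne_of_lt h))
  rw [hkeys, List.foldl_map]
  calc (pvFirsts [] S).foldl
        (fun t p => PySem.Set.add (PySem.Set.add t (cf.getD p.1 0))
          ((S.foldl (fun d q => d.insert q.2 q.1) PySem.Dict.empty).getD p.1 0))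
        PySem.Set.empty
      = (pvFirsts [] S).foldl
        (fun t p => PySem.Set.add (PySem.Set.add t p.2) (pvLastB S p.1)) PySem.Set.empty := by
        apply PySem.List.foldl_congr_mem
        intro acc p hp
        have h1 : cf.getD p.1 0 = p.2 :=
          PySem.Dict.getD_of_mem_items cf (by rw [hitems]; exact hp) hndk 0
        have h2 : (S.foldl (fun d q => d.insert q.2 q.1) PySem.Dict.empty).getD p.1 0
            = pvLastB S p.1 := by
          rw [PySem.Dict.getD_eq_get?_getD, pvInsFold_get?, PySem.Dict.get?_empty,
            Option.or_none]
          rfl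
        rw [h1, h2]
    _ = PySem.Set.ofList ((pvFirsts [] S).flatMap (fun p => [p.2, pvLastB S p.1])) := by
        rw [pvFold2]
        rfl
    _ = PySem.Set.ofList (pvPeel S) := by
        rw [← pvMain S hndS, PySem.Set.ofList_ofList]
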